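-- pv_equiv track=rewrite | github.com/kiraskywing/Code_Practice | Math/Easy/LET_no1323_Maximum 69 Number.py | maximum69Number
-- ===== SOURCE A (Python) =====
-- def maximum69Number (num: int) -> int:
--     pos = 0
--     res_i = -1
--     temp = num
--
--     while temp > 0:
--         if temp % 10 == 6:
--             res_i = pos
--
--         temp //= 10
--         pos += 1
--
--     return num if res_i == -1 else num + 3 * (10 ** res_i)
-- ===== SOURCE B (Python) =====
-- def maximum69Number(num: int) -> int:
--     # Recursive digit rewrite: fix the most-significant 6 found while
--     # unwinding the recursion over the decimal digits.
--     if num <= 0: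
--         return num
--     q, r = divmod(num, 10)
--     fq = maximum69Number(q)
--     if fq != q:          # a 6 was already replaced in a higher digit
--         return fq * 10 + r
--     if r == 6:           # this digit is the highest 6
--         return q * 10 + 9
--     return num
-- ===== Notes on version B (the rewrite author's own statement) =====
-- stated objective: alternative
-- what changed: Replaces A's index-tracking while loop plus closed-form 10**i correction with a structural recursion over the decimal digits that rewrites the most-significant 6 in place while unwinding.
import Mathlib
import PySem

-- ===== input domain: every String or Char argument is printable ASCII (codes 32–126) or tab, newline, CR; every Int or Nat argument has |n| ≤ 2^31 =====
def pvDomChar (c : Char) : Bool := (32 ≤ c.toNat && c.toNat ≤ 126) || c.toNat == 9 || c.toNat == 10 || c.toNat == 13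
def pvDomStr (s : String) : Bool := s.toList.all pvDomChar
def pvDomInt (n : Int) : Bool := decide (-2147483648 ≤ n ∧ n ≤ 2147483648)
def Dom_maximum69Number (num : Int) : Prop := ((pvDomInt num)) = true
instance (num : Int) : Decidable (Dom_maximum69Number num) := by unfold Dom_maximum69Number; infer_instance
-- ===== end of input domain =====

-- B replaces A's index-tracking while loop plus the 10**i correction by a structural
-- recursion over the decimal digits that rewrites the most-significant 6 while unwinding
-- (alternative decomposition, same cost).

-- ===== PORT A =====
-- the while loop: state (temp, pos, res_i), returns the final res_i
def pvLoopA (temp pos res : Int) : Int :=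
  if h : temp > 0 then
    pvLoopA (PySem.Int.floordiv temp 10) (pos + 1)
      (if PySem.Int.mod temp 10 = 6 then pos else res)
  else res
termination_by temp.toNat
decreasing_by
  rw [PySem.Int.floordiv_eq_ediv_of_pos (by norm_num)]; omega

def maximum69Number (num : Int) : Int :=
  let res := pvLoopA num 0 (-1)
  -- 10 ** res_i : in this branch res_i ≥ 0, so the Nat exponent res.toNat is exact
  if res = -1 then num else num + 3 * (10 ^ res.toNat)

-- ===== PORT B =====
def maximum69Number_alt (num : Int) : Int :=
  if _h : num ≤ 0 then num
  else
    let q := PySem.Int.floordiv num 10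
    let r := PySem.Int.mod num 10
    let fq := maximum69Number_alt q
    if fq ≠ q then fq * 10 + r
    else if r = 6 then q * 10 + 9
    else num
termination_by num.toNat
decreasing_by
  rw [PySem.Int.floordiv_eq_ediv_of_pos (by norm_num)]; omega

-- ===== PRECONDITION & SPEC =====
def Spec_maximum69Number (num : Int) (out : Int) : Prop := out = maximum69Number_alt num
instance (num : Int) (out : Int) : Decidable (Spec_maximum69Number num out) := by unfold Spec_maximum69Number; infer_instance

-- ===== CLAIM (what is proved, stated in full; the proofs are below) =====
def Claim_equal_maximum69Number : Prop := ∀ (num : Int), Dom_maximum69Number num → Spec_maximum69Number num (maximum69Number num)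

-- ===== LEMMAS AND PROOFS =====

-- position of the most-significant digit 6 of n (none if there is no 6 / n ≤ 0)
def pvS (n : Int) : Option Nat :=
  if _h : 0 < n then
    match pvS (PySem.Int.floordiv n 10) with
    | some k => some (k + 1)
    | none => if PySem.Int.mod n 10 = 6 then some 0 else none
  else none
termination_by n.toNat
decreasing_by
  rw [PySem.Int.floordiv_eq_ediv_of_pos (by norm_num)]; omega

theorem pvLoopA_eq_aux (t : Nat) :
    ∀ (temp pos res : Int), temp.toNat ≤ t →
      pvLoopA temp pos res =
        (match pvS temp with | some k => pos + (k : Int) | none => res) := by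
  induction t with
  | zero =>
    intro temp pos res hle
    rw [pvLoopA, pvS]
    simp [show ¬ temp > 0 by omega]
  | succ t iht =>
    intro temp pos res hle
    by_cases h : (0 : Int) < temp
    · have hfd : PySem.Int.floordiv temp 10 = temp / 10 :=
        PySem.Int.floordiv_eq_ediv_of_pos (by norm_num)
      rw [pvLoopA, pvS]
      simp only [dif_pos h]
      rw [iht _ _ _ (by rw [hfd]; omega)]
      cases hq : pvS (PySem.Int.floordiv temp 10) with
      | some k => simp; ring
      | none => split_ifs <;> simp
    · rw [pvLoopA, pvS]
      simp [h]

theorem pvLoopA_eq (temp pos res : Int) :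
    pvLoopA temp pos res =
      (match pvS temp with | some k => pos + (k : Int) | none => res) :=
  pvLoopA_eq_aux temp.toNat temp pos res le_rfl

theorem alt_eq_aux (t : Nat) :
    ∀ (n : Int), n.toNat ≤ t →
      maximum69Number_alt n =
        (match pvS n with | some k => n + 3 * 10 ^ k | none => n) := by
  induction t with
  | zero =>
    intro n hle
    rw [maximum69Number_alt, pvS]
    simp [show n ≤ 0 by omega, show ¬ (0:Int) < n by omega]
  | succ t iht =>
    intro n hle
    by_cases h : (0 : Int) < n
    · have hfd : PySem.Int.floordiv n 10 = n / 10 :=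
        PySem.Int.floordiv_eq_ediv_of_pos (by norm_num)
      have hid := PySem.Int.floordiv_mul_add_mod n 10
      have ih := iht (PySem.Int.floordiv n 10) (by rw [hfd]; omega)
      rw [maximum69Number_alt, pvS]
      simp only [dif_neg (show ¬ n ≤ 0 by omega), dif_pos h]
      cases hq : pvS (PySem.Int.floordiv n 10) with
      | some k =>
        rw [hq] at ih
        simp only [ih] at *
        have hpow : (0 : Int) < 3 * 10 ^ k := by positivity
        rw [if_pos (show PySem.Int.floordiv n 10 + 3 * 10 ^ k ≠ PySem.Int.floordiv n 10 by omega)]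
        show _ = n + 3 * 10 ^ (k + 1)
        rw [pow_succ]
        linear_combination hid
      | none =>
        rw [hq] at ih
        simp only [ih] at *
        rw [if_neg (by simp)]
        split_ifs with h6
        · show _ = n + 3 * 10 ^ 0
          rw [h6] at hid
          norm_num
          omega
        · rfl
    · rw [maximum69Number_alt, pvS]
      simp [show n ≤ 0 by omega, h]

theorem alt_eq (n : Int) :
    maximum69Number_alt n =
      (match pvS n with | some k => n + 3 * 10 ^ k | none => n) :=
  alt_eq_aux n.toNat n le_rfl

theorem maximum69Number_spec : Claim_equal_maximum69Number := by
  unfold Claim_equal_maximum69Number Spec_maximum69Number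
  intro num _
  unfold maximum69Number
  rw [pvLoopA_eq, alt_eq]
  cases hs : pvS num with
  | none => simp
  | some k =>
    simp only []
    simp
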